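-- pv_equiv track=rewrite | github.com/AdamZhouSE/pythonHomework | Code/CodeRecords/2206/60792/240395.py | F
-- ===== SOURCE A (Python) =====
-- def cal(n,m):
--     result=1
--     for i in range(n,n+m):
--         result=result*i
--     return result
--
-- def F(n):
--     a=0
--     if n==1:
--         return 1
--     else:
--         x=int(n*(n-1)/2)+1
--         a=F(n-1)+cal(x,n)
--         return a
-- ===== SOURCE B (Python) =====
-- def F(n):
--     total = 0
--     for k in range(1, n + 1):
--         x = k * (k - 1) // 2 + 1
--         p = 1
--         for i in range(x, x + k):
--             p *= i
--         total += p
--     return total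
-- ===== Notes on version B (the rewrite author's own statement) =====
-- stated objective: simpler
-- what changed: Replaced the two-helper linear recursion (F(n)=F(n-1)+cal(x,n)) by a single flat accumulating loop over k=1..n that adds the product of each consecutive block; iterative, no recursion limit.
import Mathlib
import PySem

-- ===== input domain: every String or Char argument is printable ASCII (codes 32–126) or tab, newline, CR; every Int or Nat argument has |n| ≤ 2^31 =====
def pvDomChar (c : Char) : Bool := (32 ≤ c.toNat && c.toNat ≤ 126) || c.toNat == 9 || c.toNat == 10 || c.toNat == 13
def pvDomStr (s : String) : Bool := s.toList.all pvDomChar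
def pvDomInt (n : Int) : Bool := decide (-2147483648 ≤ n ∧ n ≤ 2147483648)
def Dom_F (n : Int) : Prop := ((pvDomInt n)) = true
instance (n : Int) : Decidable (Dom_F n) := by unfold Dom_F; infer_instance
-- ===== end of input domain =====

-- B replaces A's two-helper linear recursion by one flat iterative accumulating loop (simpler, no recursion limit).

-- ===== PORT A =====
-- cal(n, m): product of range(n, n+m)
def cal (n m : Int) : Int :=
  (PySem.List.pyRange n (n + m) 1).foldl (fun result i => result * i) 1

-- int(n*(n-1)/2) is Python float true division; on Pre_F (n ≤ 997) n*(n-1) ≤ 993012 < 2^53,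
-- so the float value is exact and int(...) equals the floor division ported here.
def F (n : Int) : Int :=
  if n = 1 then 1
  else if n ≤ 0 then 0  -- Python recurses forever here (RecursionError); excluded by Pre_F
  else F (n - 1) + cal (PySem.Int.floordiv (n * (n - 1)) 2 + 1) n
termination_by n.toNat
decreasing_by omega

-- ===== PORT B =====
def F_alt (n : Int) : Int :=
  (PySem.List.pyRange 1 (n + 1) 1).foldl
    (fun total k =>
      total +
        (PySem.List.pyRange (PySem.Int.floordiv (k * (k - 1)) 2 + 1)
            (PySem.Int.floordiv (k * (k - 1)) 2 + 1 + k) 1).foldl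
          (fun p i => p * i) 1)
    0

-- ===== PRECONDITION & SPEC =====
-- A returns only on 1 ≤ n; for n ≤ 0 the recursion never reaches the base case, and for
-- n > 997 the recursion depth n exceeds Python's default recursion limit — in both cases
-- A raises RecursionError (997 is the measured largest n on which A returns).
def Pre_F (n : Int) : Prop := 1 ≤ n ∧ n ≤ 997
instance (n : Int) : Decidable (Pre_F n) := by unfold Pre_F; infer_instance
def pvWitness_F : Int := 5
def Spec_F (n : Int) (out : Int) : Prop := out = F_alt n
instance (n : Int) (out : Int) : Decidable (Spec_F n out) := by unfold Spec_F; infer_instance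

-- ===== CLAIM (what is proved, stated in full; the proofs are below) =====
def Claim_equal_F : Prop := ∀ (n : Int), Dom_F n → Pre_F n → Spec_F n (F n)

-- ===== LEMMAS AND PROOFS =====

theorem F_alt_succ (n : Int) (h : 1 ≤ n) :
    F_alt (n + 1) = F_alt n + cal (PySem.Int.floordiv ((n + 1) * n) 2 + 1) (n + 1) := by
  unfold F_alt cal
  rw [show n + 1 + 1 = n + 1 + 1 from rfl,
    PySem.List.pyRange_one_succ_right (a := 1) (b := n + 1) (by omega),
    List.foldl_append]
  simp only [List.foldl_cons, List.foldl_nil]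
  ring_nf

theorem F_eq_F_alt (n : Int) (h : 1 ≤ n) : F n = F_alt n := by
  induction n, h using Int.le_induction with
  | base =>
    rw [F]
    decide
  | succ n hn ih =>
    rw [F_alt_succ n hn, F, if_neg (by omega), if_neg (by omega),
      show n + 1 - 1 = n from by ring, ih]

-- ===== VERDICT (by name: the statement is the Claim_ definition above) =====
theorem F_spec : Claim_equal_F := by
  intro n _ hpre
  unfold Spec_F
  exact F_eq_F_alt n hpre.1
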